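-- pv_equiv track=rewrite | github.com/letgodchan0/Al_Is_Well | 5주차/0705/지은/신고 결과 받기.py | solution
-- ===== SOURCE A (Python) =====
-- def solution(id_list, report, k):
--     di = {}
--     mail = {}
--     for key in id_list:
--         di[key] = [0,[]]
--         mail[key] = 0
--     report = list(set(report))
--     for rprt in report:
--         u, s = rprt.split()
--         di[s][0] += 1
--         di[s][1].append(u)
--     for d in di:
--         if di[d][0]>=k:
--             for n in di[d][1]:
--                 mail[n] += 1
--     return list(mail.values())
-- ===== SOURCE B (Python) =====
-- def solution(id_list, report, k):
--     pairs = [r.split() for r in set(report)]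
--     reported = [s for _, s in pairs]
--     return [sum(1 for u, s in pairs if u == i and reported.count(s) >= k)
--             for i in dict.fromkeys(id_list)]
-- ===== Notes on version B (the rewrite author's own statement) =====
-- stated objective: alternative
-- what changed: B discards all of A's dictionaries: it splits the deduplicated reports into pairs once and answers each id directly with a nested comprehension, counting the deduped reports it filed against users whose occurrence count in the reported-column list is >= k.
-- outside the precondition, e.g. on solution(['a'], ['x a'], 5): A returns [0], B returns [0]
import Mathlib
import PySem

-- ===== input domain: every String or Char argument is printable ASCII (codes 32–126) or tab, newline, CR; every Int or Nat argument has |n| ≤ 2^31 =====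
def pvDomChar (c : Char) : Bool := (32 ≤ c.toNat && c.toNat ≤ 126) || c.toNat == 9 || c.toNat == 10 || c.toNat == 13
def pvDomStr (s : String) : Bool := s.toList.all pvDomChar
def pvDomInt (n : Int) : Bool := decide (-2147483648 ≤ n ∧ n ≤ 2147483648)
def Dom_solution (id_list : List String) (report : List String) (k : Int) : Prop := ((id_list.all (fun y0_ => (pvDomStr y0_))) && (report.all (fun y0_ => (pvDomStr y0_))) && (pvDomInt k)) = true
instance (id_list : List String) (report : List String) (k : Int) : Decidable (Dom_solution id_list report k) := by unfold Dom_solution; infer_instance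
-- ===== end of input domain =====

-- B drops A's dictionaries entirely: it splits the deduped reports into pairs once and answers
-- each id by a nested comprehension counting its reports against users reported >= k times;
-- an alternative (dict-free, quadratic) decomposition, not faster.
-- Python's list(set(report)) iteration order is not modelled; both results are order-independent.

-- ===== PORT A =====
-- u, s = rprt.split(); di[s][0] += 1; di[s][1].append(u); mail[n] += 1 raise where the split is
-- not a 2-token one or a key is missing; those inputs are excluded by Pre_ and the port leaves
-- the dict unchanged there.
def solution (id_list : List String) (report : List String) (k : Int) : List Int :=
  let di : PySem.Dict String (Int × List String) :=
    id_list.foldl (fun d key => d.insert key (0, [])) PySem.Dict.empty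
  let mail : PySem.Dict String Int :=
    id_list.foldl (fun d key => d.insert key 0) PySem.Dict.empty
  let report' := PySem.Set.ofList report
  let di := report'.foldl (fun d rprt =>
      -- u, s = rprt.split(): exactly-two unpacking, ported by hand (exact: other lengths
      -- raise ValueError in Python and are excluded by Pre_)
      let ts := PySem.Str.split₀ rprt
      if ts.length = 2 then
        d.modify (ts.getD 1 "") (0, []) (fun p => (p.1 + 1, p.2 ++ [ts.getD 0 ""]))
      else d) di
  let mail := di.items.foldl (fun m it =>
      if it.2.1 ≥ k then it.2.2.foldl (fun m n => m.modify n 0 (· + 1)) m else m) mail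
  mail.values

-- ===== PORT B =====
-- 'for u, s in pairs' unpacking is ported by hand via getD 0 / getD 1 (exact on Pre_, where
-- every deduped report splits into exactly two tokens); dict.fromkeys(id_list) iterates the
-- distinct ids in first-occurrence order = PySem.Set.ofList; sum(1 for … if cond) = countP.
def solution_alt (id_list : List String) (report : List String) (k : Int) : List Int :=
  let pairs := (PySem.Set.ofList report).map (fun r => PySem.Str.split₀ r)
  let reported := pairs.map (fun ts => ts.getD 1 "")
  (PySem.Set.ofList id_list).map (fun i =>
    ((pairs.countP (fun ts =>
        ts.getD 0 "" == i &&
          decide ((PySem.List.count reported (ts.getD 1 "") : Int) ≥ k))) : Int))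

-- ===== PRECONDITION & SPEC =====
-- Pre_ is the problem's stated input shape: each report is "reporter reported" with both ids in
-- id_list. Outside it A raises ValueError (split not 2 tokens) or KeyError (unknown reported user,
-- or unknown reporter of a heavy user); the only excluded inputs where A still returns are reports
-- whose reporter is an unknown id that never gets mailed (see claim cites).
def Pre_solution (id_list : List String) (report : List String) (k : Int) : Prop :=
  ∀ r ∈ report, (PySem.Str.split₀ r).length = 2 ∧ ∀ t ∈ PySem.Str.split₀ r, t ∈ id_list
instance (id_list : List String) (report : List String) (k : Int) : Decidable (Pre_solution id_list report k) := by unfold Pre_solution; infer_instance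

def pvWitness_solution : List String × List String × Int :=
  (["muzi", "frodo", "apeach", "neo"],
   ["muzi frodo", "apeach frodo", "frodo neo", "muzi neo", "apeach muzi"], 2)

def Spec_solution (id_list : List String) (report : List String) (k : Int) (out : List Int) : Prop := out = solution_alt id_list report k
instance (id_list : List String) (report : List String) (k : Int) (out : List Int) : Decidable (Spec_solution id_list report k out) := by unfold Spec_solution; infer_instance

-- ===== CLAIM (what is proved, stated in full; the proofs are below) =====
def Claim_equal_solution : Prop := ∀ (id_list : List String) (report : List String) (k : Int), Dom_solution id_list report k → Pre_solution id_list report k → Spec_solution id_list report k (solution id_list report k)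

-- ===== LEMMAS AND PROOFS =====

-- the (reporter, reported) pair of one report line, if it is a 2-token line
def pvG (r : String) : Option (String × String) :=
  let ts := PySem.Str.split₀ r
  if ts.length = 2 then some (ts.getD 0 "", ts.getD 1 "") else none

-- the deduplicated report pairs
def pvL (report : List String) : List (String × String) :=
  (PySem.Set.ofList report).filterMap pvG

-- how often user s was reported
def pvC (report : List String) (s : String) : Int :=
  ((pvL report).countP (fun p => p.2 == s) : Int)

-- number of deduplicated reports by x against users reported at least k times
def pvGood (report : List String) (k : Int) (x : String) : Nat :=
  (pvL report).countP (fun p => p.1 == x && decide (pvC report p.2 ≥ k))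

theorem pvG_char {r : String} {p : String × String} (hg : pvG r = some p) :
    p = ((PySem.Str.split₀ r).getD 0 "", (PySem.Str.split₀ r).getD 1 "") ∧
      p.1 ∈ PySem.Str.split₀ r ∧ p.2 ∈ PySem.Str.split₀ r := by
  by_cases h2 : (PySem.Str.split₀ r).length = 2
  · have hp : p = ((PySem.Str.split₀ r).getD 0 "", (PySem.Str.split₀ r).getD 1 "") := by
      simpa [pvG, h2] using hg.symm
    refine ⟨hp, ?_, ?_⟩
    · rw [hp]
      show (PySem.Str.split₀ r).getD 0 "" ∈ PySem.Str.split₀ r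
      rw [List.getD_eq_getElem _ _ (by omega)]
      exact List.getElem_mem _
    · rw [hp]
      show (PySem.Str.split₀ r).getD 1 "" ∈ PySem.Str.split₀ r
      rw [List.getD_eq_getElem _ _ (by omega)]
      exact List.getElem_mem _
  · simp [pvG, h2] at hg

theorem beq_swap (a b : String) : (a == b) = (b == a) := by
  by_cases h : a = b
  · simp [h]
  · simp [h, Ne.symm h]

theorem keys_modify' {ν : Type} (d : PySem.Dict String ν) (k : String) (d0 : ν) (f : ν → ν) :
    (d.modify k d0 f).keys = PySem.Set.add d.keys k := by
  simpa [PySem.Set.update] using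
    PySem.Dict.keys_foldl_modify [k] d0 (fun _ _ => f) d

theorem set_add_of_mem {s : PySem.Set String} {x : String} (h : x ∈ s) :
    s.add x = s := by
  simp [PySem.Set.add, h]

theorem set_update_of_subset (l : List String) (s : PySem.Set String)
    (h : ∀ x ∈ l, x ∈ s) : s.update l = s := by
  induction l generalizing s with
  | nil => rfl
  | cons x l ih =>
    have : PySem.Set.update s (x :: l) = PySem.Set.update (s.add x) l := rfl
    rw [this, set_add_of_mem (h x (by simp))]
    exact ih s (fun y hy => h y (by simp [hy]))

theorem base_getD {ν : Type} (v0 : ν) (L : List String)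
    (d : PySem.Dict String ν) (h : ∀ x, d.getD x v0 = v0) (s : String) :
    (L.foldl (fun d key => d.insert key v0) d).getD s v0 = v0 := by
  induction L generalizing d with
  | nil => exact h s
  | cons key L ih =>
    refine ih (d.insert key v0) (fun x => ?_)
    by_cases hx : x = key
    · subst hx; exact PySem.Dict.getD_insert_self d x v0 v0
    · rw [PySem.Dict.getD_insert_of_ne d v0 v0 hx]; exact h x

theorem items_eq {ν : Type} (d : PySem.Dict String ν) (v0 : ν) (h : d.keys.Nodup) :
    d.items = d.keys.map (fun s => (s, d.getD s v0)) := by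
  obtain ⟨l⟩ := d
  induction l with
  | nil => rfl
  | cons p t ih =>
    obtain ⟨k, v⟩ := p
    have hk : (PySem.Dict.mk ((k, v) :: t) : PySem.Dict String ν).keys
        = k :: (PySem.Dict.mk t : PySem.Dict String ν).keys := rfl
    rw [hk] at h ⊢
    have hnd := h
    simp only [List.nodup_cons] at hnd
    rw [List.map_cons]
    have hhead : (PySem.Dict.mk ((k, v) :: t) : PySem.Dict String ν).getD k v0 = v := by
      simp [PySem.Dict.getD, PySem.Dict.get?_mk_cons]
    have htail : ∀ s ∈ (PySem.Dict.mk t : PySem.Dict String ν).keys,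
        (PySem.Dict.mk ((k, v) :: t) : PySem.Dict String ν).getD s v0
          = (PySem.Dict.mk t : PySem.Dict String ν).getD s v0 := by
      intro s hs
      have hne : k ≠ s := fun he => hnd.1 (he ▸ hs)
      simp [PySem.Dict.getD, PySem.Dict.get?_mk_cons, hne]
    calc (PySem.Dict.mk ((k, v) :: t) : PySem.Dict String ν).items
        = (k, v) :: (PySem.Dict.mk t : PySem.Dict String ν).items := rfl
      _ = (k, v) :: (PySem.Dict.mk t : PySem.Dict String ν).keys.map
            (fun s => (s, (PySem.Dict.mk t : PySem.Dict String ν).getD s v0)) := by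
            rw [← ih hnd.2]
      _ = _ := by
            rw [hhead]
            congr 1
            exact (List.map_congr_left (fun s hs => by rw [htail s hs])).symm

-- characterization of A's di-building loop
theorem A_build_getD (L : List String) (d : PySem.Dict String (Int × List String)) (s : String) :
    (L.foldl (fun d rprt =>
      let ts := PySem.Str.split₀ rprt
      if ts.length = 2 then
        d.modify (ts.getD 1 "") (0, []) (fun p => (p.1 + 1, p.2 ++ [ts.getD 0 ""]))
      else d) d).getD s (0, []) =
    ((d.getD s (0, [])).1 + ((L.filterMap pvG).countP (fun p => p.2 == s) : Int),
     (d.getD s (0, [])).2 ++ ((L.filterMap pvG).filter (fun p => p.2 == s)).map (·.1)) := by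
  induction L generalizing d with
  | nil => simp
  | cons r L ih =>
    by_cases hl : (PySem.Str.split₀ r).length = 2
    · have hg : pvG r = some ((PySem.Str.split₀ r).getD 0 "", (PySem.Str.split₀ r).getD 1 "") := by
        simp [pvG, hl]
      simp only [List.foldl_cons, List.filterMap_cons, hg]
      rw [if_pos hl, ih, PySem.Dict.getD_modify]
      by_cases hs : s = (PySem.Str.split₀ r).getD 1 ""
      · rw [if_pos hs, hs]
        have hbeq : (((PySem.Str.split₀ r).getD 0 "", (PySem.Str.split₀ r).getD 1 "").2
            == (PySem.Str.split₀ r).getD 1 "") = true := beq_self_eq_true _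
        simp only [List.countP_cons, List.filter_cons, hbeq, if_true, List.map_cons,
          Prod.mk.injEq]
        constructor
        · push_cast; ring
        · simp
      · rw [if_neg hs]
        have hbeq : (((PySem.Str.split₀ r).getD 0 "", (PySem.Str.split₀ r).getD 1 "").2 == s)
            = false := beq_eq_false_iff_ne.mpr (fun h => hs h.symm)
        simp only [List.countP_cons, List.filter_cons, hbeq]
        simp
    · have hg : pvG r = none := by simp [pvG, hl]
      simp only [List.foldl_cons, List.filterMap_cons, hg]
      rw [if_neg hl]
      exact ih d

theorem A_build_keys (L : List String) (d : PySem.Dict String (Int × List String)) :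
    (L.foldl (fun d rprt =>
      let ts := PySem.Str.split₀ rprt
      if ts.length = 2 then
        d.modify (ts.getD 1 "") (0, []) (fun p => (p.1 + 1, p.2 ++ [ts.getD 0 ""]))
      else d) d).keys = PySem.Set.update d.keys ((L.filterMap pvG).map (·.2)) := by
  induction L generalizing d with
  | nil => rfl
  | cons r L ih =>
    by_cases hl : (PySem.Str.split₀ r).length = 2
    · have hg : pvG r = some ((PySem.Str.split₀ r).getD 0 "", (PySem.Str.split₀ r).getD 1 "") := by
        simp [pvG, hl]
      simp only [List.foldl_cons, List.filterMap_cons, hg]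
      rw [if_pos hl, ih, keys_modify']
      rfl
    · have hg : pvG r = none := by simp [pvG, hl]
      simp only [List.foldl_cons, List.filterMap_cons, hg]
      rw [if_neg hl]
      exact ih d

theorem A_mail_flat (k : Int) (items : List (String × (Int × List String)))
    (m : PySem.Dict String Int) :
    items.foldl (fun m it =>
        if it.2.1 ≥ k then it.2.2.foldl (fun m n => m.modify n 0 (· + 1)) m else m) m
    = (items.flatMap (fun it => if it.2.1 ≥ k then it.2.2 else [])).foldl
        (fun m n => m.modify n 0 (· + 1)) m := by
  induction items generalizing m with
  | nil => rfl
  | cons it items ih =>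
    by_cases hc : it.2.1 ≥ k <;>
      simp [List.flatMap_cons, hc, List.foldl_append, ih]

theorem inc_keys (l : List String) (m : PySem.Dict String Int) :
    (l.foldl (fun m n => m.modify n 0 (· + 1)) m).keys = PySem.Set.update m.keys l :=
  PySem.Dict.keys_foldl_modify l 0 (fun _ _ v => v + 1) m

theorem set_update_nil (l : List String) :
    PySem.Set.update ([] : PySem.Set String) l = PySem.Set.ofList l := by
  rw [PySem.Set.ofList_eq_foldl]; rfl

theorem base_keys {ν : Type} (v0 : ν) (L : List String) :
    (L.foldl (fun d key => d.insert key v0) PySem.Dict.empty).keys = PySem.Set.ofList L := by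
  have h := PySem.Dict.keys_foldl_insert (κ := String) (ν := ν) L (fun _ _ => v0) PySem.Dict.empty
  have h' : (L.foldl (fun d key => d.insert key v0) PySem.Dict.empty).keys
      = PySem.Set.update (PySem.Dict.empty : PySem.Dict String ν).keys L := h
  rw [h', PySem.Dict.keys_empty, set_update_nil]

theorem sum_map_ite_count (K : List String) (a : String) :
    (K.map (fun s => if (s == a) = true then 1 else 0)).sum = K.count a := by
  induction K with
  | nil => rfl
  | cons x K ih =>
    simp only [List.map_cons, List.sum_cons, List.count_cons, ih]
    split_ifs <;> omega

theorem countP_partition (L : List (String × String)) (w : String × String → Bool)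
    (K : List String) (hK : K.Nodup) (hcl : ∀ p ∈ L, w p = true → p.2 ∈ K) :
    (K.map (fun s => L.countP (fun p => w p && p.2 == s))).sum = L.countP w := by
  induction L with
  | nil => simp
  | cons p L ih =>
    have hcl' : ∀ q ∈ L, w q = true → q.2 ∈ K := fun q hq => hcl q (by simp [hq])
    simp only [List.countP_cons]
    have : (K.map (fun s => L.countP (fun q => w q && q.2 == s)
        + if (w p && p.2 == s) = true then 1 else 0)).sum
        = (K.map (fun s => L.countP (fun q => w q && q.2 == s))).sum
        + (K.map (fun s => if (w p && p.2 == s) = true then 1 else 0)).sum :=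
      List.sum_map_add
    rw [this, ih hcl']
    congr 1
    by_cases hw : w p = true
    · have hmem : p.2 ∈ K := hcl p (by simp) hw
      have : (K.map (fun s => if (w p && p.2 == s) = true then 1 else 0)).sum
          = (K.map (fun s => if (s == p.2) = true then 1 else 0)).sum := by
        congr 1
        refine List.map_congr_left (fun s _ => ?_)
        rw [hw, Bool.true_and, beq_swap]
      rw [this, sum_map_ite_count, List.count_eq_one_of_mem hK hmem, if_pos hw]
    · have hw' : w p = false := by simpa using hw
      simp [hw']

-- elements of the deduplicated pair list come from well-formed reports
theorem pvL_mem {id_list report : List String} {k : Int}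
    (hpre : Pre_solution id_list report k) :
    ∀ p ∈ pvL report, p.1 ∈ id_list ∧ p.2 ∈ id_list := by
  intro p hp
  rw [pvL, List.mem_filterMap] at hp
  obtain ⟨r, hr, hg⟩ := hp
  have hrep : r ∈ report := (PySem.Set.mem_ofList report r).mp hr
  obtain ⟨-, h1, h2⟩ := pvG_char hg
  have := (hpre r hrep).2
  exact ⟨this p.1 h1, this p.2 h2⟩

-- with every report a 2-token line, the filterMap of pvG is a plain map
theorem pvL_eq_map (L : List String)
    (h2 : ∀ r ∈ L, (PySem.Str.split₀ r).length = 2) :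
    L.filterMap pvG
      = L.map (fun r => ((PySem.Str.split₀ r).getD 0 "", (PySem.Str.split₀ r).getD 1 "")) := by
  induction L with
  | nil => rfl
  | cons r L ih =>
    have hg : pvG r = some ((PySem.Str.split₀ r).getD 0 "", (PySem.Str.split₀ r).getD 1 "") := by
      simp [pvG, h2 r (by simp)]
    simp only [List.filterMap_cons, hg, List.map_cons]
    rw [ih (fun x hx => h2 x (by simp [hx]))]

-- the mail dict: initialized to 0 on id_list, incremented along F ⊆ id_list
theorem values_inc (id_list : List String) (F : List String)
    (hF : ∀ n ∈ F, n ∈ id_list) :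
    (F.foldl (fun m n => m.modify n 0 (· + 1))
      (id_list.foldl (fun d key => d.insert key (0 : Int)) PySem.Dict.empty)).values
    = (PySem.Set.ofList id_list).map (fun x => (F.count x : Int)) := by
  have hK : (F.foldl (fun m n => m.modify n 0 (· + 1))
      (id_list.foldl (fun d key => d.insert key (0 : Int)) PySem.Dict.empty)).keys
      = PySem.Set.ofList id_list := by
    rw [inc_keys, base_keys]
    exact set_update_of_subset F _ (fun n hn => (PySem.Set.mem_ofList id_list n).mpr (hF n hn))
  have hval : ∀ (d : PySem.Dict String Int), d.values = d.items.map (·.2) := fun _ => rfl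
  rw [hval, items_eq _ (0 : Int) (by rw [hK]; exact PySem.Set.nodup_ofList id_list), hK,
    List.map_map]
  refine List.map_congr_left (fun x _ => ?_)
  show (F.foldl (fun m n => m.modify n 0 (· + 1))
      (id_list.foldl (fun d key => d.insert key (0 : Int)) PySem.Dict.empty)).getD x 0
    = (F.count x : Int)
  rw [PySem.Dict.getD_foldl_modify_add_one,
    base_getD _ id_list PySem.Dict.empty (fun y => PySem.Dict.getD_empty y 0) x, zero_add]

-- A's flattened increment list counts exactly the heavy deduped reports by x
theorem A_count (report : List String) (k : Int) (x : String) (K : List String)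
    (hK : K.Nodup) (hcl : ∀ p ∈ pvL report, p.2 ∈ K) :
    (K.flatMap (fun s => if pvC report s ≥ k
        then ((pvL report).filter (fun p => p.2 == s)).map (·.1) else [])).count x
      = pvGood report k x := by
  rw [List.count_flatMap]
  have hmap : ∀ s ∈ K, (List.count x ∘ fun s => if pvC report s ≥ k
      then ((pvL report).filter (fun p => p.2 == s)).map (·.1) else []) s
      = (pvL report).countP (fun p => (p.1 == x && decide (pvC report p.2 ≥ k)) && p.2 == s) := by
    intro s _
    by_cases hks : pvC report s ≥ k
    · simp only [Function.comp_apply, if_pos hks]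
      rw [List.count_eq_countP, List.countP_map, List.countP_filter]
      refine List.countP_congr (fun p _ => ?_)
      simp only [Function.comp_apply, Bool.and_eq_true, beq_iff_eq, decide_eq_true_eq]
      constructor
      · rintro ⟨h1, h2⟩; exact ⟨⟨h1, h2 ▸ hks⟩, h2⟩
      · rintro ⟨⟨h1, _⟩, h2⟩; exact ⟨h1, h2⟩
    · simp only [Function.comp_apply, if_neg hks, List.count_nil]
      symm
      rw [List.countP_eq_zero]
      intro p _ hcontra
      simp only [Bool.and_eq_true, beq_iff_eq, decide_eq_true_eq] at hcontra
      exact hks (hcontra.2 ▸ hcontra.1.2)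
  rw [List.map_congr_left hmap,
    countP_partition (pvL report) _ K hK (fun p hp _ => hcl p hp)]
  rfl

-- A returns, for each id, the number of deduped heavy reports it filed
theorem A_sol_eq (id_list report : List String) (k : Int)
    (hpre : Pre_solution id_list report k) :
    solution id_list report k
      = (PySem.Set.ofList id_list).map (fun x => (pvGood report k x : Int)) := by
  have hpl := pvL_mem hpre
  have hbase : ∀ s : String,
      (id_list.foldl (fun d key => d.insert key ((0 : Int), ([] : List String)))
        PySem.Dict.empty).getD s ((0 : Int), ([] : List String)) = (0, []) :=
    fun s => base_getD _ id_list PySem.Dict.empty (fun y => PySem.Dict.getD_empty y _) s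
  have hdiG : ∀ s : String,
      ((PySem.Set.ofList report).foldl (fun d rprt =>
        let ts := PySem.Str.split₀ rprt
        if ts.length = 2 then
          d.modify (ts.getD 1 "") ((0 : Int), ([] : List String))
            (fun p => (p.1 + 1, p.2 ++ [ts.getD 0 ""]))
        else d)
        (id_list.foldl (fun d key => d.insert key ((0 : Int), ([] : List String)))
          PySem.Dict.empty)).getD s ((0 : Int), ([] : List String))
      = (pvC report s, ((pvL report).filter (fun p => p.2 == s)).map (·.1)) := by
    intro s
    rw [A_build_getD, hbase]
    simp [pvC, pvL]
  have hdiK : ((PySem.Set.ofList report).foldl (fun d rprt =>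
        let ts := PySem.Str.split₀ rprt
        if ts.length = 2 then
          d.modify (ts.getD 1 "") ((0 : Int), ([] : List String))
            (fun p => (p.1 + 1, p.2 ++ [ts.getD 0 ""]))
        else d)
        (id_list.foldl (fun d key => d.insert key ((0 : Int), ([] : List String)))
          PySem.Dict.empty)).keys
      = PySem.Set.update (PySem.Set.ofList id_list) ((pvL report).map (·.2)) := by
    rw [A_build_keys, base_keys]
    rfl
  have hdiN : ((PySem.Set.ofList report).foldl (fun d rprt =>
        let ts := PySem.Str.split₀ rprt
        if ts.length = 2 then
          d.modify (ts.getD 1 "") ((0 : Int), ([] : List String))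
            (fun p => (p.1 + 1, p.2 ++ [ts.getD 0 ""]))
        else d)
        (id_list.foldl (fun d key => d.insert key ((0 : Int), ([] : List String)))
          PySem.Dict.empty)).keys.Nodup := by
    rw [hdiK]
    exact PySem.Set.nodup_update _ _ (PySem.Set.nodup_ofList id_list)
  simp only [solution]
  rw [A_mail_flat, items_eq _ ((0 : Int), ([] : List String)) hdiN, hdiK, List.flatMap_map]
  simp only [hdiG]
  show (((PySem.Set.update (PySem.Set.ofList id_list) ((pvL report).map (·.2))).flatMap
      (fun s => if pvC report s ≥ k
        then ((pvL report).filter (fun p => p.2 == s)).map (·.1) else [])).foldl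
      (fun m n => m.modify n 0 (· + 1))
      (id_list.foldl (fun d key => d.insert key (0 : Int)) PySem.Dict.empty)).values
    = (PySem.Set.ofList id_list).map (fun x => (pvGood report k x : Int))
  refine (values_inc id_list _ (fun n hn => ?_)).trans ?_
  · rw [List.mem_flatMap] at hn
    obtain ⟨s, _, hn⟩ := hn
    by_cases hks : pvC report s ≥ k
    · rw [if_pos hks, List.mem_map] at hn
      obtain ⟨p, hp, rfl⟩ := hn
      exact (hpl p (List.mem_of_mem_filter hp)).1
    · rw [if_neg hks] at hn
      cases hn
  · refine List.map_congr_left (fun x _ => ?_)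
    refine congrArg Nat.cast (A_count report k x _ ?_ ?_)
    · exact PySem.Set.nodup_update _ _ (PySem.Set.nodup_ofList id_list)
    · exact fun p hp =>
        (PySem.Set.mem_update _ _ _).mpr (Or.inr (List.mem_map.mpr ⟨p, hp, rfl⟩))

-- B returns the same per-id count, computed by its nested comprehension
theorem B_sol_eq (id_list report : List String) (k : Int)
    (hpre : Pre_solution id_list report k) :
    solution_alt id_list report k
      = (PySem.Set.ofList id_list).map (fun x => (pvGood report k x : Int)) := by
  have h2 : ∀ r ∈ (PySem.Set.ofList report : List String),
      (PySem.Str.split₀ r).length = 2 :=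
    fun r hr => (hpre r ((PySem.Set.mem_ofList report r).mp hr)).1
  have hL : pvL report
      = (PySem.Set.ofList report).map
          (fun r => ((PySem.Str.split₀ r).getD 0 "", (PySem.Str.split₀ r).getD 1 "")) :=
    pvL_eq_map _ h2
  simp only [solution_alt]
  refine List.map_congr_left (fun x _ => ?_)
  refine congrArg Nat.cast ?_
  -- both sides: a countP over Set.ofList report
  rw [List.countP_map]
  unfold pvGood
  rw [hL, List.countP_map]
  refine (List.countP_congr (fun r hr => ?_)).symm
  have hcnt : (PySem.List.count
      (((PySem.Set.ofList report).map (fun r => PySem.Str.split₀ r)).map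
        (fun ts => ts.getD 1 ""))
      ((PySem.Str.split₀ r).getD 1 "") : Int)
      = pvC report ((PySem.Str.split₀ r).getD 1 "") := by
    rw [PySem.List.count_eq, List.count_eq_countP, List.map_map, List.countP_map]
    unfold pvC
    rw [hL, List.countP_map]
    rfl
  simp only [Function.comp]
  rw [hcnt]

-- ===== VERDICT (by name: the statement is the Claim_ definition above) =====
theorem solution_spec : Claim_equal_solution := by
  intro id_list report k _ hpre
  unfold Spec_solution
  rw [A_sol_eq id_list report k hpre, B_sol_eq id_list report k hpre]
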